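-- pv_equiv track=rewrite | github.com/RPHolloway/aoc | 2025/6/6.py | part2
-- ===== SOURCE A (Python) =====
-- def part1(input):
--     result = 0
--
--     for row in input:
--         x = 0
--         operator = row[0].strip()
--
--         if operator == "*":
--             x = 1
--             for cell in row[1:]:
--                 x *= int(cell)
--         elif operator == "+":
--             x = 0
--             for cell in row[1:]:
--                 x += int(cell)
--
--         result += x
--
--     return result
--
-- def part2(input):
--     result = 0
--     problems = []
--
--     for row in input:
--         operator = row[0][-1]
--         problem = [operator]
--         for x in row:
--             problem.append(''.join(x[:-1]).strip())
--
--         problems.append(problem)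
--
--     result = part1(problems)
--
--     return result
-- ===== SOURCE B (Python) =====
-- def part2(input):
--     total = 0
--     for row in input:
--         op = row[0][-1]
--         if op == "*":
--             x = 1
--             for cell in row:
--                 x *= int(cell[:-1].strip())
--             total += x
--         elif op == "+":
--             for cell in row:
--                 total += int(cell[:-1].strip())
--     return total
-- ===== Notes on version B (the rewrite author's own statement) =====
-- stated objective: simpler
-- what changed: B fuses the two phases into one pass: instead of materialising a rewritten 'problems' list and feeding it to the part1 helper, it reads each row's operator directly from row[0][-1] and accumulates the row's product or sum (parsing cells only inside the recognised-operator branches) straight into the running total.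
import Mathlib
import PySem

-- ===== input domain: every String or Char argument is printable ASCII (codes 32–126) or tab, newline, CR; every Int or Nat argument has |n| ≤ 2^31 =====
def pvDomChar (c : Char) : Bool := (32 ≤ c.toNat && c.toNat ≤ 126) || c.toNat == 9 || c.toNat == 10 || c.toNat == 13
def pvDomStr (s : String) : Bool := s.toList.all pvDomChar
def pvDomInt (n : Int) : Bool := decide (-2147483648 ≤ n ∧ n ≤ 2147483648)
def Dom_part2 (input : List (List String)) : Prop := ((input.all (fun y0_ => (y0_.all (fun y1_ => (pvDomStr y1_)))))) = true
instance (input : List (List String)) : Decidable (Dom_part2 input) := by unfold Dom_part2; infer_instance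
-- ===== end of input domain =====

-- B fuses A's rewrite-then-part1 two-phase computation into a single pass with no
-- intermediate 'problems' list; same return value, no side effects in either version.

-- ===== PORT A =====
def part1 (input : List (List String)) : Int :=
  input.foldl (fun result row =>
    let operator := PySem.Str.strip (PySem.List.pyGetD row 0 "")
    let x : Int :=
      if operator = "*" then
        (PySem.List.slice row (some 1) none).foldl
          (fun x cell => x * (PySem.Int.ofStr? cell).getD 0) 1
      else if operator = "+" then
        (PySem.List.slice row (some 1) none).foldl
          (fun x cell => x + (PySem.Int.ofStr? cell).getD 0) 0
      else 0
    result + x) 0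

def part2 (input : List (List String)) : Int :=
  let problems := input.foldl (fun problems row =>
    let operator := (PySem.Str.pyGet? (PySem.List.pyGetD row 0 "") (-1)).getD ' '
    let problem := row.foldl (fun problem x =>
      problem ++ [PySem.Str.strip (PySem.Str.join ""
        ((PySem.Str.slice x none (some (-1))).toList.map (fun c => String.ofList [c])))])
      [String.ofList [operator]]
    problems ++ [problem]) []
  part1 problems

-- ===== PORT B =====
def part2_alt (input : List (List String)) : Int :=
  input.foldl (fun total row =>
    let op := (PySem.Str.pyGet? (PySem.List.pyGetD row 0 "") (-1)).getD ' '
    if op = '*' then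
      total + row.foldl (fun x cell =>
        x * (PySem.Int.ofStr? (PySem.Str.strip (PySem.Str.slice cell none (some (-1))))).getD 0) 1
    else if op = '+' then
      row.foldl (fun total cell =>
        total + (PySem.Int.ofStr? (PySem.Str.strip (PySem.Str.slice cell none (some (-1))))).getD 0) total
    else total) 0

-- ===== PRECONDITION & SPEC =====
-- Pre_ excludes exactly the inputs on which A raises: a row that is empty or whose first
-- string is empty (IndexError on row[0][-1]), and a row whose operator is '*' or '+' but
-- some rewritten cell does not parse as an int (ValueError).
def Pre_part2 (input : List (List String)) : Prop :=
  ∀ row ∈ input, row ≠ [] ∧ row.headD "" ≠ "" ∧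
    (((PySem.Str.pyGet? (row.headD "") (-1)).getD ' ' = '*' ∨
      (PySem.Str.pyGet? (row.headD "") (-1)).getD ' ' = '+') →
      ∀ cell ∈ row,
        (PySem.Int.ofStr? (PySem.Str.strip (PySem.Str.slice cell none (some (-1))))).isSome)
instance (input : List (List String)) : Decidable (Pre_part2 input) := by
  unfold Pre_part2; infer_instance

def pvWitness_part2 : List (List String) := [["1*", "2x", "3y"], ["4+", "51"]]

def Spec_part2 (input : List (List String)) (out : Int) : Prop := out = part2_alt input
instance (input : List (List String)) (out : Int) : Decidable (Spec_part2 input out) := by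
  unfold Spec_part2; infer_instance

-- ===== CLAIM (what is proved, stated in full; the proofs are below) =====
def Claim_equal_part2 : Prop :=
  ∀ (input : List (List String)), Dom_part2 input → Pre_part2 input → Spec_part2 input (part2 input)

-- ===== LEMMAS AND PROOFS =====

-- strip of a one-character string keeps or drops the character
theorem pv_strip_singleton (c : Char) :
    PySem.Chars.strip [c] = if PySem.Chars.isspace c then [] else [c] := by
  by_cases h : PySem.Chars.isspace c <;>
    simp [PySem.Chars.strip, PySem.Chars.lstrip, PySem.Chars.rstrip, h]

-- stripping a one-character string compares equal to a non-space one-character string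
-- exactly when the characters are equal
theorem pv_strip_mk_eq (c d : Char) (hd : PySem.Chars.isspace d = false) :
    (PySem.Str.strip (String.ofList [c]) = String.ofList [d]) ↔ c = d := by
  rw [← String.toList_inj]
  simp only [PySem.Str.toList_strip, String.toList_ofList, pv_strip_singleton]
  by_cases h : PySem.Chars.isspace c
  · simp only [h, if_true]
    constructor
    · intro hcontra; exact absurd hcontra (by simp)
    · rintro rfl; rw [hd] at h; cases h
  · simp [h]

theorem pv_strip_mk_star (c : Char) :
    (PySem.Str.strip (String.ofList [c]) = "*") ↔ c = '*' := by
  have h1 : "*" = String.ofList ['*'] := by decide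
  rw [h1, pv_strip_mk_eq c '*' (by decide)]

theorem pv_strip_mk_plus (c : Char) :
    (PySem.Str.strip (String.ofList [c]) = "+") ↔ c = '+' := by
  have h1 : "+" = String.ofList ['+'] := by decide
  rw [h1, pv_strip_mk_eq c '+' (by decide)]

-- ''.join over the characters of a string is that string
theorem pv_join_singletons (s : String) :
    PySem.Str.join "" (s.toList.map (fun c => String.ofList [c])) = s := by
  rw [← String.toList_inj]
  simp only [PySem.Str.toList_join, List.map_map]
  have h1 : (String.toList ∘ fun c => String.ofList [c]) = fun c => [c] := by
    funext c; simp
  have h2 : "".toList = [] := by decide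
  rw [h1, h2, PySem.Chars.join_nil_singletons]

-- the two ports agree on every input (A's rewritten row fed to part1 computes exactly
-- B's per-row contribution; on malformed rows both ports take the else branch)
theorem pv_main (input : List (List String)) : part2 input = part2_alt input := by
  simp only [part2, part1, part2_alt, PySem.List.foldl_append_singleton_eq_map,
    List.nil_append, List.singleton_append, List.foldl_map, pv_join_singletons]
  apply PySem.List.foldl_congr_mem
  intro acc row _
  simp only [PySem.List.pyGetD_zero_cons, PySem.List.slice_from_one, List.tail_cons,
    pv_strip_mk_star, pv_strip_mk_plus, List.foldl_map]
  split_ifs with h1 h2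
  · rfl
  · rw [PySem.List.foldl_add, PySem.List.foldl_add]
    omega
  · omega

-- ===== VERDICT (by name: the statement is the Claim_ definition above) =====
theorem part2_spec : Claim_equal_part2 := by
  intro input _ _
  simpa [Spec_part2] using pv_main input
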